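-- pv_equiv track=rewrite | github.com/Jaceyli/COMP9021-17S2 | Lab/Lab_10/s1.py | possible_subtractions
-- ===== SOURCE A (Python) =====
-- def possible_subtractions(L):
--     if len(L) == 1:
--         return (str(L[0]),)
--     return (''.join(['(', e1, '-', e2, ')'])
--             for i in range(1, len(L))
--                 for e1 in possible_subtractions(L[i:])
--                     for e2 in possible_subtractions(L[:i])
--     )
-- ===== SOURCE B (Python) =====
-- def possible_subtractions(L):
--     # Bottom-up interval DP: rows[k][lo] holds the tuple of expressions for the
--     # length-(k+1) sublist starting at lo; A's recursion is replayed once per interval.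
--     n = len(L)
--     if n == 1:
--         return (str(L[0]),)
--     rows = [[(str(x),) for x in L]]
--     for length in range(2, n + 1):
--         row = []
--         for lo in range(n - length + 1):
--             cell = []
--             for i in range(1, length):
--                 for e1 in rows[length - i - 1][lo + i]:
--                     for e2 in rows[i - 1][lo]:
--                         cell.append('(' + e1 + '-' + e2 + ')')
--             row.append(tuple(cell))
--         rows.append(row)
--     return (s for s in (rows[n - 1][0] if n else ()))
-- ===== Notes on version B (the rewrite author's own statement) =====
-- stated objective: faster
-- what changed: Replaced A's top-down recursion, which rebuilds every sublist's expression list from scratch (and re-runs the prefix recursion once per suffix expression inside the generator), by a bottom-up dynamic-programming table over contiguous intervals that computes each sublist's expression tuple exactly once.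
import Mathlib
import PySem

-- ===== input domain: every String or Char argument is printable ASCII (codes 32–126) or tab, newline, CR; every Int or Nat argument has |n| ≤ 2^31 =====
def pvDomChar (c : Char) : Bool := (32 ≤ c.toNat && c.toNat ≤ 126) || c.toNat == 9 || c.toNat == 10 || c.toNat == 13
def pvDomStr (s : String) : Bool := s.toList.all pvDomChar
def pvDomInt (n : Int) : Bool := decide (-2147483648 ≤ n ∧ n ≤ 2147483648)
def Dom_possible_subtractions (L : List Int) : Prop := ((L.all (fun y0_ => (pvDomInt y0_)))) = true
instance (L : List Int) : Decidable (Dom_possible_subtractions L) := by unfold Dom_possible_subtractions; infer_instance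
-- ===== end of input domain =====

-- B replaces A's recursion (which re-enumerates every sublist's expressions from scratch,
-- re-running the prefix recursion once per suffix expression) by a bottom-up interval table
-- computed once per sublist; objective: faster.


-- ===== PORT A =====
-- A's recursion, step for step; the Nat fuel only makes the slice recursion total:
-- fuel = len(L) always suffices (both slices for 1 ≤ i < len are strictly shorter).
-- range(1, len(L)) over non-negative ints is exactly List.range' 1 (len-1);
-- L[i:] / L[:i] for 0 ≤ i ≤ len are exactly drop / take; str(n) = PySem.Int.toStr;
-- the generator's nested loops materialize as foldl-append of flatMap/map in the same order.
def psA : Nat → List Int → List String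
  | 0, _ => []
  | f+1, L =>
    if L.length = 1 then [PySem.Int.toStr L.headI]
    else (List.range' 1 (L.length - 1)).foldl
      (fun acc i => acc ++ (psA f (L.drop i)).flatMap (fun e1 =>
        (psA f (L.take i)).map (fun e2 => "(" ++ e1 ++ "-" ++ e2 ++ ")"))) []

def possible_subtractions (L : List Int) : List String := psA L.length L

-- ===== PORT B =====
-- the cell loop of Source B: 'for i in range(1, length): for e1 in rows[length-i-1][lo+i]:
-- for e2 in rows[i-1][lo]: cell.append(...)'; all row/column indices are in range in B,
-- so List.getD is exact for Python's rows[...][...] here.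
def psCell (rows : List (List (List String))) (len lo : Nat) : List String :=
  (List.range' 1 (len - 1)).foldl (fun cell i =>
    cell ++ (((rows.getD (len - i - 1) []).getD (lo + i) []).flatMap (fun e1 =>
      ((rows.getD (i - 1) []).getD lo []).map (fun e2 => "(" ++ e1 ++ "-" ++ e2 ++ ")")))) []

def possible_subtractions_alt (L : List Int) : List String :=
  let n := L.length
  if n = 1 then [PySem.Int.toStr L.headI]
  else
    let rows := (List.range' 2 (n - 1)).foldl
      (fun rows len => rows ++ [(List.range' 0 (n - len + 1)).map (psCell rows len)])
      [L.map (fun x => [PySem.Int.toStr x])]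
    if n = 0 then [] else (rows.getD (n - 1) []).getD 0 []

-- ===== PRECONDITION & SPEC =====
def Spec_possible_subtractions (L : List Int) (out : List String) : Prop := out = possible_subtractions_alt L
instance (L : List Int) (out : List String) : Decidable (Spec_possible_subtractions L out) := by unfold Spec_possible_subtractions; infer_instance

-- ===== CLAIM (what is proved, stated in full; the proofs are below) =====
def Claim_equal_possible_subtractions : Prop := ∀ (L : List Int), Dom_possible_subtractions L → Spec_possible_subtractions L (possible_subtractions L)

-- ===== LEMMAS AND PROOFS =====

-- interval L[lo : lo+len]
def pvS (L : List Int) (lo len : Nat) : List Int := (L.drop lo).take len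

-- row the table should hold for length ℓ
def pvRow (L : List Int) (ℓ : Nat) : List (List String) :=
  (List.range' 0 (L.length - ℓ + 1)).map (fun lo => possible_subtractions (pvS L lo ℓ))

theorem getD_map_range' {α : Type} (f : Nat → α) (s n k : Nat) (h : k < n) (d : α) :
    ((List.range' s n).map f).getD k d = f (s + k) := by
  rw [List.getD_eq_getElem _ _ (by simp [h])]
  simp

theorem psA_mono (n : Nat) : ∀ (L : List Int) (f g : Nat), L.length = n →
    n ≤ f → n ≤ g → psA f L = psA g L := by
  induction n using Nat.strong_induction_on with
  | _ n ih =>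
    intro L f g hL hf hg
    match f, g with
    | 0, 0 => rfl
    | 0, g+1 =>
      have : n = 0 := Nat.le_zero.mp hf
      subst this
      have : L = [] := List.eq_nil_of_length_eq_zero hL
      subst this
      simp [psA]
    | f+1, 0 =>
      have : n = 0 := Nat.le_zero.mp hg
      subst this
      have : L = [] := List.eq_nil_of_length_eq_zero hL
      subst this
      simp [psA]
    | f+1, g+1 =>
      show psA (f+1) L = psA (g+1) L
      unfold psA
      by_cases h1 : L.length = 1
      · simp [h1]
      · simp only [h1, if_false]
        apply PySem.List.foldl_congr_mem
        intro acc i hi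
        have hi' := (List.mem_range'_1).mp hi
        have h1i : 1 ≤ i := hi'.1
        have hin : i < L.length := by omega
        have hd : (L.drop i).length = n - i := by simp [hL]
        have ht : (L.take i).length = i := by simp [hL]; omega
        have e1 : psA f (L.drop i) = psA g (L.drop i) := by
          apply ih (n - i) (by omega) _ _ _ hd <;> omega
        have e2 : psA f (L.take i) = psA g (L.take i) := by
          apply ih i (by omega) _ _ _ ht <;> omega
        simp only [e1, e2]

theorem psA_fuel (L : List Int) (f : Nat) (hf : L.length ≤ f) :
    psA f L = possible_subtractions L :=
  psA_mono L.length L f L.length rfl hf le_rfl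

theorem ps_flatMap (L : List Int) (h2 : 2 ≤ L.length) :
    possible_subtractions L =
      (List.range' 1 (L.length - 1)).flatMap (fun i =>
        (possible_subtractions (L.drop i)).flatMap (fun e1 =>
          (possible_subtractions (L.take i)).map (fun e2 => "(" ++ e1 ++ "-" ++ e2 ++ ")"))) := by
  obtain ⟨f, hf⟩ : ∃ f, L.length = f + 1 := ⟨L.length - 1, by omega⟩
  have h1 : L.length ≠ 1 := by omega
  have hcong : ∀ (acc : List String), ∀ i ∈ List.range' 1 (L.length - 1),
      acc ++ (psA f (L.drop i)).flatMap (fun e1 =>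
        (psA f (L.take i)).map (fun e2 => "(" ++ e1 ++ "-" ++ e2 ++ ")")) =
      acc ++ (possible_subtractions (L.drop i)).flatMap (fun e1 =>
        (possible_subtractions (L.take i)).map (fun e2 => "(" ++ e1 ++ "-" ++ e2 ++ ")")) := by
    intro acc i hi
    have hi' := (List.mem_range'_1).mp hi
    have t1 : psA f (L.drop i) = possible_subtractions (L.drop i) := by
      apply psA_fuel; simp; omega
    have t2 : psA f (L.take i) = possible_subtractions (L.take i) := by
      apply psA_fuel; simp; omega
    simp only [t1, t2]
  conv_lhs => rw [possible_subtractions, hf]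
  simp only [psA]
  rw [if_neg h1]
  refine Eq.trans (PySem.List.foldl_congr_mem _ _
    (fun (acc : List String) i => acc ++ (possible_subtractions (L.drop i)).flatMap (fun e1 =>
      (possible_subtractions (L.take i)).map (fun e2 => "(" ++ e1 ++ "-" ++ e2 ++ ")"))) _ hcong) ?_
  rw [PySem.List.foldl_append_eq_flatMap, List.nil_append]

theorem pvS_len (L : List Int) (lo len : Nat) (h : lo + len ≤ L.length) :
    (pvS L lo len).length = len := by
  simp [pvS]; omega

theorem pvS_drop (L : List Int) (lo len i : Nat) (_hi : i ≤ len) :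
    (pvS L lo len).drop i = pvS L (lo + i) (len - i) := by
  simp [pvS, List.drop_take, List.drop_drop]

theorem pvS_take (L : List Int) (lo len i : Nat) (hi : i ≤ len) :
    (pvS L lo len).take i = pvS L lo i := by
  simp [pvS, List.take_take, Nat.min_eq_left hi]

theorem ps_single (x : Int) : possible_subtractions [x] = [PySem.Int.toStr x] := rfl

theorem pvS_single (L : List Int) (lo : Nat) (h : lo < L.length) :
    pvS L lo 1 = [L.getD lo 0] := by
  have hlen : (pvS L lo 1).length = 1 := pvS_len L lo 1 (by omega)
  apply List.ext_getElem (by simp [hlen])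
  intro k hk hk'
  have hk0 : k = 0 := by omega
  subst hk0
  simp [pvS, List.getElem?_eq_getElem h]

-- the interval recurrence, phrased on pvS
theorem ps_interval (L : List Int) (lo len : Nat) (h2 : 2 ≤ len) (hle : lo + len ≤ L.length) :
    possible_subtractions (pvS L lo len) =
      (List.range' 1 (len - 1)).flatMap (fun i =>
        (possible_subtractions (pvS L (lo + i) (len - i))).flatMap (fun e1 =>
          (possible_subtractions (pvS L lo i)).map (fun e2 => "(" ++ e1 ++ "-" ++ e2 ++ ")"))) := by
  have hlen := pvS_len L lo len hle
  rw [ps_flatMap _ (by omega), hlen]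
  apply List.flatMap_congr
  intro i hi
  have hi' := (List.mem_range'_1).mp hi
  rw [pvS_drop L lo len i (by omega), pvS_take L lo len i (by omega)]

-- first row of the table is pvRow 1
theorem row1_eq (L : List Int) (h : 1 ≤ L.length) :
    L.map (fun x => [PySem.Int.toStr x]) = pvRow L 1 := by
  apply List.ext_getElem
  · simp [pvRow]; omega
  · intro k h1 h2
    have hk : k < L.length := by simpa using h1
    simp only [pvRow, List.getElem_map, List.getElem_range', Nat.zero_add, Nat.one_mul]
    rw [pvS_single L k hk, ps_single]
    simp [List.getElem?_eq_getElem hk]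

-- a freshly computed cell is correct when the table holds pvRow 1 .. pvRow m
theorem cell_eq (L : List Int) (m lo : Nat) (h1 : 1 ≤ m)
    (hlo : lo + (m + 1) ≤ L.length) :
    psCell ((List.range' 1 m).map (pvRow L)) (m + 1) lo =
      possible_subtractions (pvS L lo (m + 1)) := by
  rw [ps_interval L lo (m+1) (by omega) hlo]
  unfold psCell
  have hcong : ∀ (acc : List String), ∀ i ∈ List.range' 1 (m + 1 - 1),
      acc ++ (((((List.range' 1 m).map (pvRow L)).getD (m + 1 - i - 1) []).getD (lo + i) []).flatMap (fun e1 =>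
          ((((List.range' 1 m).map (pvRow L)).getD (i - 1) []).getD lo []).map
            (fun e2 => "(" ++ e1 ++ "-" ++ e2 ++ ")"))) =
      acc ++ ((possible_subtractions (pvS L (lo + i) (m + 1 - i))).flatMap (fun e1 =>
          (possible_subtractions (pvS L lo i)).map
            (fun e2 => "(" ++ e1 ++ "-" ++ e2 ++ ")"))) := by
    intro acc i hi
    have hi' := (List.mem_range'_1).mp hi
    have e1 : ((List.range' 1 m).map (pvRow L)).getD (m + 1 - i - 1) [] = pvRow L (m + 1 - i) := by
      rw [getD_map_range' (pvRow L) 1 m (m + 1 - i - 1) (by omega)]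
      congr 1; omega
    have e2 : ((List.range' 1 m).map (pvRow L)).getD (i - 1) [] = pvRow L i := by
      rw [getD_map_range' (pvRow L) 1 m (i - 1) (by omega)]
      congr 1; omega
    simp only [e1, e2]
    have e3 : (pvRow L (m + 1 - i)).getD (lo + i) [] = possible_subtractions (pvS L (lo + i) (m + 1 - i)) := by
      unfold pvRow
      rw [getD_map_range' _ 0 (L.length - (m + 1 - i) + 1) (lo + i) (by omega)]
      simp
    have e4 : (pvRow L i).getD lo [] = possible_subtractions (pvS L lo i) := by
      unfold pvRow
      rw [getD_map_range' _ 0 (L.length - i + 1) lo (by omega)]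
      simp
    simp only [e3, e4]
  refine Eq.trans (PySem.List.foldl_congr_mem _ _
    (fun (acc : List String) i => acc ++ ((possible_subtractions (pvS L (lo + i) (m + 1 - i))).flatMap (fun e1 =>
      (possible_subtractions (pvS L lo i)).map (fun e2 => "(" ++ e1 ++ "-" ++ e2 ++ ")")))) _ hcong) ?_
  rw [PySem.List.foldl_append_eq_flatMap]
  simp

-- the fold builds exactly rows 1..m
theorem rows_inv (L : List Int) (m : Nat) (h1 : 1 ≤ m) (hm : m ≤ L.length) :
    (List.range' 2 (m - 1)).foldl
      (fun rows len => rows ++ [(List.range' 0 (L.length - len + 1)).map (psCell rows len)])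
      [L.map (fun x => [PySem.Int.toStr x])]
    = (List.range' 1 m).map (pvRow L) := by
  induction m with
  | zero => omega
  | succ m ihm =>
    by_cases hm1 : m = 0
    · subst hm1
      simp [row1_eq L (by omega)]
    · have hrec := ihm (by omega) (by omega)
      have hsplit : List.range' 2 (m + 1 - 1) = List.range' 2 (m - 1) ++ [m + 1] := by
        have : m + 1 - 1 = (m - 1) + 1 := by omega
        rw [this, List.range'_concat]
        congr 2; omega
      rw [hsplit, List.foldl_append, hrec]
      have hrow : (List.range' 0 (L.length - (m+1) + 1)).map
            (psCell ((List.range' 1 m).map (pvRow L)) (m+1)) =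
          pvRow L (m + 1) := by
        unfold pvRow
        apply List.map_congr_left
        intro lo hlo
        have hlo' := (List.mem_range'_1).mp hlo
        exact cell_eq L m lo (by omega) (by omega)
      rw [List.foldl_cons, List.foldl_nil, hrow]
      have harg : 1 + 1 * m = m + 1 := by omega
      conv_rhs => rw [List.range'_concat, harg]
      simp

-- ===== VERDICT (by name: the statement is the Claim_ definition above) =====
theorem possible_subtractions_spec : Claim_equal_possible_subtractions := by
  intro L _
  unfold Spec_possible_subtractions possible_subtractions_alt
  by_cases h1 : L.length = 1
  · simp only [h1, if_true]
    conv_lhs => rw [possible_subtractions, h1]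
    simp only [psA]
    rw [if_pos h1]
  · simp only [h1, if_false]
    by_cases h0 : L.length = 0
    · simp only [h0, if_true]
      have : L = [] := List.eq_nil_of_length_eq_zero h0
      subst this
      rfl
    · simp only [h0, if_false]
      rw [rows_inv L L.length (by omega) le_rfl]
      have e1 : ((List.range' 1 L.length).map (pvRow L)).getD (L.length - 1) [] = pvRow L L.length := by
        rw [getD_map_range' (pvRow L) 1 L.length (L.length - 1) (by omega)]
        congr 1; omega
      rw [e1]
      unfold pvRow
      rw [getD_map_range' _ 0 (L.length - L.length + 1) 0 (by omega)]
      simp [pvS]
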